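-- pv_equiv track=rewrite | github.com/wittrup/crap | TUMAGA/amazon.py | walltocord
-- ===== SOURCE A (Python) =====
-- def walltocord(wall, magnification=1, peakwidth=1):
--     """creates a list of start and end coordinates for each line to be drawn from string representation of a maze wall
--     :param wall:          string representation of wall
--     :param magnification: magnification applied to output coordinates
--     :param peakwidth:     A couple of weeks ago, cannot remember what I was thinking here...
--     :return:              list of [(startpos * magnification, end_pos  * magnification)]"""
--     """decodes a horizontal maze line and creates a list of start and end position for each line to be drawn"""
--     out = []
--     rising_edge = False
--     startpos = 0
--     for i, c in enumerate(wall):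
--         if c in '+-|': # value is above threshold
--             if not rising_edge:
--                 rising_edge = True
--                 startpos = i
--         else:
--             if rising_edge: # this is falling edge
--                 rising_edge = False
--                 if startpos < i - peakwidth: # signal is wider than peak limit
--                     out += [(startpos * magnification, (i - peakwidth) * magnification)] # append to list
--     # after loop check if complete signal is high, if so append
--     if rising_edge and startpos <= i - peakwidth:
--         out += [(startpos * magnification, i  * magnification)]
--     return out
-- ===== SOURCE B (Python) =====
-- def walltocord(wall, magnification=1, peakwidth=1):
--     """Run-based reimplementation: extract maximal '+-|' runs, then emit one
--     segment per qualifying run (internal runs end at e-peakwidth with strict <,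
--     a run touching the string end ends at len-1 with non-strict <=)."""
--     n = len(wall)
--     runs = []
--     j = 0
--     while j < n:
--         if wall[j] in '+-|':
--             s = j
--             while j < n and wall[j] in '+-|':
--                 j += 1
--             runs.append((s, j))
--         else:
--             j += 1
--     out = []
--     for s, e in runs:
--         if e < n:
--             if s < e - peakwidth:
--                 out.append((s * magnification, (e - peakwidth) * magnification))
--         else:
--             if s <= e - 1 - peakwidth:
--                 out.append((s * magnification, (e - 1) * magnification))
--     return out
-- ===== Notes on version B (the rewrite author's own statement) =====
-- stated objective: alternative
-- what changed: Replaced the per-character rising/falling-edge state machine (flags rising_edge/startpos mutated inside one enumerate loop, with a post-loop fixup) by a two-phase pass: first extract the maximal runs of wall characters (plus, minus, pipe) as (start, end) pairs, then emit one segment per qualifying run, with internal runs ending at end-peakwidth (strict less-than) and a run touching the string end ending at len-1 (non-strict).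
import Mathlib
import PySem

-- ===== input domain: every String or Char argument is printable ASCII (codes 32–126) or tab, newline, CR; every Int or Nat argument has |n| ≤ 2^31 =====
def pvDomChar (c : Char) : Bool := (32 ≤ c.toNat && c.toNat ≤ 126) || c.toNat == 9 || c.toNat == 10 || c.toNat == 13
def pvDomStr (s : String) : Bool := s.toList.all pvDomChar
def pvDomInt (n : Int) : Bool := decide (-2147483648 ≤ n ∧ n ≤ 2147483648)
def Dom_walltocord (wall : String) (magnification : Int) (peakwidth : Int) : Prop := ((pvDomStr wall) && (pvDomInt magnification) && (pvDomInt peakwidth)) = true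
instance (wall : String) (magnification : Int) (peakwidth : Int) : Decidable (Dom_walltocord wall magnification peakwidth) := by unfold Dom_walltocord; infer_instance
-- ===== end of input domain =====

-- B replaces A's per-character rising/falling-edge state machine with a two-phase
-- run-based pass (extract maximal '+-|' runs, then emit a segment per run); objective: alternative decomposition, same cost.

-- ===== PORT A =====
-- `c in '+-|'`
def wallChar (c : Char) : Bool := c = '+' || c = '-' || c = '|'

-- the for-loop of A, one step per character, carrying (out, rising_edge, startpos) and i
def walltocordLoop (magnification peakwidth : Int) :
    List Char → Int → List (Int × Int) × Bool × Int → List (Int × Int) × Bool × Int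
  | [], _, st => st
  | c :: rest, i, (out, rising, startpos) =>
    if wallChar c then
      if !rising then
        walltocordLoop magnification peakwidth rest (i + 1) (out, true, i)
      else
        walltocordLoop magnification peakwidth rest (i + 1) (out, rising, startpos)
    else
      if rising then
        if startpos < i - peakwidth then
          walltocordLoop magnification peakwidth rest (i + 1)
            (out ++ [(startpos * magnification, (i - peakwidth) * magnification)], false, startpos)
        else
          walltocordLoop magnification peakwidth rest (i + 1) (out, false, startpos)
      else
        walltocordLoop magnification peakwidth rest (i + 1) (out, rising, startpos)

def walltocord (wall : String) (magnification : Int) (peakwidth : Int) : List (Int × Int) :=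
  let st := walltocordLoop magnification peakwidth wall.toList 0 ([], false, 0)
  -- after the loop, i holds the last index (len - 1); the check fires only if rising_edge
  let i : Int := (wall.toList.length : Int) - 1
  if st.2.1 && decide (st.2.2 ≤ i - peakwidth) then
    st.1 ++ [(st.2.2 * magnification, i * magnification)]
  else st.1

-- ===== PORT B =====
-- inner while loop of Source B: consume a run of wall chars, returning its exclusive end and the rest
def takeRun : List Char → Nat → Nat × List Char
  | [], j => (j, [])
  | c :: rest, j => if wallChar c then takeRun rest (j + 1) else (j, c :: rest)

theorem takeRun_len_le (l : List Char) (j : Nat) : (takeRun l j).2.length ≤ l.length := by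
  induction l generalizing j with
  | nil => simp [takeRun]
  | cons c rest ih =>
    simp only [takeRun]
    split
    · exact le_trans (ih (j + 1)) (Nat.le_succ _)
    · simp

-- outer while loop of Source B: the list of maximal runs (s, e)
def wallRuns : List Char → Nat → List (Nat × Nat)
  | [], _ => []
  | c :: rest, j =>
    if wallChar c then
      let r := takeRun rest (j + 1)
      (j, r.1) :: wallRuns r.2 r.1
    else
      wallRuns rest (j + 1)
  termination_by l _ => l.length
  decreasing_by
  · exact Nat.lt_succ_of_le (takeRun_len_le rest (j + 1))
  · simp

-- emission loop of Source B
def emitRuns (n : Nat) (magnification peakwidth : Int) : List (Nat × Nat) → List (Int × Int)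
  | [] => []
  | (s, e) :: rest =>
    (if e < n then
       if (s : Int) < (e : Int) - peakwidth then
         [((s : Int) * magnification, ((e : Int) - peakwidth) * magnification)]
       else []
     else
       if (s : Int) ≤ (e : Int) - 1 - peakwidth then
         [((s : Int) * magnification, ((e : Int) - 1) * magnification)]
       else []) ++ emitRuns n magnification peakwidth rest

def walltocord_alt (wall : String) (magnification : Int) (peakwidth : Int) : List (Int × Int) :=
  emitRuns wall.toList.length magnification peakwidth (wallRuns wall.toList 0)

-- ===== PRECONDITION & SPEC =====
def Spec_walltocord (wall : String) (magnification : Int) (peakwidth : Int) (out : List (Int × Int)) : Prop := out = walltocord_alt wall magnification peakwidth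
instance (wall : String) (magnification : Int) (peakwidth : Int) (out : List (Int × Int)) : Decidable (Spec_walltocord wall magnification peakwidth out) := by unfold Spec_walltocord; infer_instance

-- ===== CLAIM (what is proved, stated in full; the proofs are below) =====
def Claim_equal_walltocord : Prop := ∀ (wall : String) (magnification : Int) (peakwidth : Int), Dom_walltocord wall magnification peakwidth → Spec_walltocord wall magnification peakwidth (walltocord wall magnification peakwidth)

-- ===== LEMMAS AND PROOFS =====

-- A's post-loop finalization, parametrized by the total length n
def finalizeA (magnification peakwidth : Int) (st : List (Int × Int) × Bool × Int) (n : Nat) :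
    List (Int × Int) :=
  if st.2.1 && decide (st.2.2 ≤ (n : Int) - 1 - peakwidth) then
    st.1 ++ [(st.2.2 * magnification, ((n : Int) - 1) * magnification)]
  else st.1

-- B's runs when a run is currently open at s, scanning chars from position j
def wallRunsOpen (chars : List Char) (j s : Nat) : List (Nat × Nat) :=
  (s, (takeRun chars j).1) :: wallRuns (takeRun chars j).2 (takeRun chars j).1

theorem loop_run (m p : Int) (chars : List Char) : ∀ (j : Nat) (out : List (Int × Int)),
    (∀ sp : Int,
      finalizeA m p (walltocordLoop m p chars (j : Int) (out, false, sp)) (j + chars.length)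
        = out ++ emitRuns (j + chars.length) m p (wallRuns chars j))
    ∧ (∀ s : Nat,
      finalizeA m p (walltocordLoop m p chars (j : Int) (out, true, (s : Int))) (j + chars.length)
        = out ++ emitRuns (j + chars.length) m p (wallRunsOpen chars j s)) := by
  induction chars with
  | nil =>
    intro j out
    constructor
    · intro sp
      simp [walltocordLoop, finalizeA, wallRuns, emitRuns]
    · intro s
      simp only [walltocordLoop, finalizeA, wallRunsOpen, takeRun, wallRuns, emitRuns,
        List.length_nil, Nat.add_zero]
      by_cases h : (s : Int) ≤ (j : Int) - 1 - p
      · simp [h]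
      · simp [h]
  | cons c rest ih =>
    intro j out
    have hcast : ((j : Int) + 1) = ((j + 1 : Nat) : Int) := by push_cast; ring
    have hlen : j + (c :: rest).length = (j + 1) + rest.length := by simp; ring
    constructor
    · intro sp
      by_cases hc : wallChar c
      · -- rising edge: open a run at j
        have h2 := (ih (j + 1) out).2 j
        simp only [walltocordLoop, hc, if_pos, Bool.not_false, wallRuns, hlen, hcast]
        simpa [wallRunsOpen] using h2
      · have h1 := (ih (j + 1) out).1 sp
        simp only [walltocordLoop, hc, if_neg, Bool.false_eq_true, not_false_eq_true, wallRuns,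
          hlen, hcast]
        simpa using h1
    · intro s
      by_cases hc : wallChar c
      · -- run continues
        have h2 := (ih (j + 1) out).2 s
        simp only [walltocordLoop, hc, if_pos, Bool.not_true, wallRunsOpen, takeRun, hlen, hcast,
          if_false, Bool.false_eq_true]
        simpa [wallRunsOpen] using h2
      · -- falling edge at i = j: run (s, j) closes; e = j < n so the internal branch fires
        have hn : j < (j + 1) + rest.length := by omega
        by_cases hlt : (s : Int) < (j : Int) - p
        · have h1 := (ih (j + 1) (out ++ [((s : Int) * m, ((j : Int) - p) * m)])).1 (s : Int)
          simp only [walltocordLoop, hc, hlt, if_pos, Bool.false_eq_true, if_false,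
            wallRunsOpen, takeRun, hlen, hcast]
          rw [h1]
          simp [emitRuns, hn, hlt, wallRuns, hc]
        · have h1 := (ih (j + 1) out).1 (s : Int)
          simp only [walltocordLoop, hc, hlt, if_pos, Bool.false_eq_true, if_false,
            wallRunsOpen, takeRun, hlen, hcast]
          rw [h1]
          simp [emitRuns, hn, hlt, wallRuns, hc]

-- ===== VERDICT (by name: the statement is the Claim_ definition above) =====
theorem walltocord_spec : Claim_equal_walltocord := by
  intro wall m p _
  unfold Spec_walltocord walltocord walltocord_alt
  have h := (loop_run m p wall.toList 0 []).1 0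
  simpa [finalizeA] using h
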